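-- pv_equiv track=rewrite | github.com/tonimaxx/automationgettop | experiment/codewar.py | xremove
-- ===== SOURCE A (Python) =====
-- def xremove(s):
--     char = ''
--     foundchar = False
--     for i in s[::-1]:
--         if not foundchar:
--             if i != '!':
--                 foundchar = True
--                 char = char+i
--         else: char = char+i
--     return char[::-1]
-- ===== SOURCE B (Python) =====
-- def xremove(s):
--     i = len(s)
--     while i > 0 and s[i-1] == '!':
--         i -= 1
--     return s[:i]
-- ===== Notes on version B (the rewrite author's own statement) =====
-- stated objective: faster
-- what changed: B finds the cut-off index of the trailing run with a backward index scan and returns a single slice s[:i], instead of A's reverse-the-string pass that rebuilds the result by repeated string concatenation and reverses again.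
import Mathlib
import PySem

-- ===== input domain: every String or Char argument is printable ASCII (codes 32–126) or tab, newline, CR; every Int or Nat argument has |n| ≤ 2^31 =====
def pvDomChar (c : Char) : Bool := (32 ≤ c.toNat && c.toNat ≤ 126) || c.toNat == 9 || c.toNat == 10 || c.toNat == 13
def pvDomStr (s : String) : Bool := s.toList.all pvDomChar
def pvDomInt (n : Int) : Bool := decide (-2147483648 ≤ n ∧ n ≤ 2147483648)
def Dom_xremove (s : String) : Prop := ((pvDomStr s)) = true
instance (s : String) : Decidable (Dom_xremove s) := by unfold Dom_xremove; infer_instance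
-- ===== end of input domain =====

-- B removes the trailing run of '!' by computing a cut-off index and slicing once,
-- instead of A's reverse/accumulate/reverse pass (measured faster: A rebuilds the result by repeated concatenation).

-- ===== PORT A =====
-- literal port of A: iterate over s[::-1] with (char, foundchar) state, then reverse char.
def xremove (s : String) : String :=
  let rev := ((PySem.List.slice? s.toList none none (-1)).getD [])
  let st := rev.foldl
    (fun (acc : List Char × Bool) (i : Char) =>
      if !acc.2 then
        if i ≠ '!' then (acc.1 ++ [i], true) else acc
      else (acc.1 ++ [i], acc.2))
    ([], false)
  String.ofList ((PySem.List.slice? st.1 none none (-1)).getD [])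

-- ===== PORT B =====
-- the while loop 'while i > 0 and s[i-1] == "!": i -= 1' as structural recursion on i
def xremoveCut (cs : List Char) : Nat → Nat
  | 0 => 0
  | n + 1 => if cs.getD n ' ' == '!' then xremoveCut cs n else n + 1

def xremove_alt (s : String) : String :=
  String.ofList (PySem.List.slice s.toList none (some (xremoveCut s.toList s.toList.length : Int)))

-- ===== PRECONDITION & SPEC =====
def Spec_xremove (s : String) (out : String) : Prop := out = xremove_alt s
instance (s : String) (out : String) : Decidable (Spec_xremove s out) := by unfold Spec_xremove; infer_instance

-- ===== CLAIM (what is proved, stated in full; the proofs are below) =====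
def Claim_equal_xremove : Prop := ∀ (s : String), Dom_xremove s → Spec_xremove s (xremove s)

-- ===== LEMMAS AND PROOFS =====

theorem xremoveCut_le (cs : List Char) (n : Nat) : xremoveCut cs n ≤ n := by
  induction n with
  | zero => simp [xremoveCut]
  | succ k ih => simp only [xremoveCut]; split <;> omega

theorem xremoveCut_append (cs d : List Char) (n : Nat) (h : n ≤ cs.length) :
    xremoveCut (cs ++ d) n = xremoveCut cs n := by
  induction n with
  | zero => rfl
  | succ k ih =>
    simp only [xremoveCut, List.getD_eq_getElem?_getD, List.getElem?_append_left (by omega : k < cs.length)]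
    rw [ih (by omega)]

theorem xremove_fold_found (r l : List Char) :
    r.foldl
      (fun (acc : List Char × Bool) (i : Char) =>
        if !acc.2 then
          if i ≠ '!' then (acc.1 ++ [i], true) else acc
        else (acc.1 ++ [i], acc.2))
      (l, true) = (l ++ r, true) := by
  induction r generalizing l with
  | nil => simp
  | cons c cs ih =>
    rw [List.foldl_cons]
    exact (ih (l ++ [c])).trans (by simp)

theorem xremove_fold_eq (r : List Char) :
    (r.foldl
      (fun (acc : List Char × Bool) (i : Char) =>
        if !acc.2 then
          if i ≠ '!' then (acc.1 ++ [i], true) else acc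
        else (acc.1 ++ [i], acc.2))
      ([], false)).1 = r.dropWhile (· == '!') := by
  induction r with
  | nil => rfl
  | cons c cs ih =>
    by_cases hc : c = '!'
    · simpa [List.foldl_cons, hc, List.dropWhile_cons] using ih
    · rw [List.foldl_cons, if_pos hc, List.dropWhile_cons_of_neg (by simpa using hc)]
      exact (congrArg Prod.fst (xremove_fold_found cs [c])).trans (by simp)

theorem xremoveCut_eq_rdropWhile (cs : List Char) :
    cs.take (xremoveCut cs cs.length) = cs.rdropWhile (· == '!') := by
  induction cs using List.reverseRecOn with
  | nil => rfl
  | append_singleton xs x ih =>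
    by_cases hx : x = '!'
    · subst hx
      rw [show (xs ++ ['!']).length = xs.length + 1 by simp]
      simp only [xremoveCut, List.getD_eq_getElem?_getD,
        List.getElem?_append_right (le_refl xs.length)]
      simp only [Nat.sub_self, List.getElem?_cons_zero, Option.getD_some,
        BEq.rfl, if_true]
      rw [xremoveCut_append xs ['!'] xs.length (le_refl _),
        List.take_append_of_le_length (xremoveCut_le xs xs.length), ih,
        List.rdropWhile_concat_pos _ _ _ (by simp)]
    · have hl : (xs ++ [x]).length = xs.length + 1 := by simp
      rw [hl]
      simp only [xremoveCut, List.getD_eq_getElem?_getD,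
        List.getElem?_append_right (le_refl xs.length)]
      simp only [Nat.sub_self, List.getElem?_cons_zero, Option.getD_some]
      rw [if_neg (by simpa using hx)]
      rw [List.take_of_length_le (by simp [hl]),
        List.rdropWhile_concat_neg _ _ _ (by simpa using hx)]

-- ===== VERDICT (by name: the statement is the Claim_ definition above) =====
theorem xremove_spec : Claim_equal_xremove := by
  intro s _
  unfold Spec_xremove xremove xremove_alt
  simp only [PySem.List.slice?_none_none_neg_one, Option.getD_some,
    PySem.List.slice_to_natCast]
  rw [xremove_fold_eq, xremoveCut_eq_rdropWhile, List.rdropWhile]
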